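-- pv_equiv track=rewrite | github.com/JavierCastroMagro03/Algorithms-Python | 6. Backtracking/Code/Dora_la_Entrenadora.py | mochilabt
-- ===== SOURCE A (Python) =====
-- def esSolucion(objetos, Peso_act, pMax, objetos_seleccionados):
--     if Peso_act >= pMax:
--         return True
--     else:
--         return False
--
-- def esFactible(objeto_act, Peso_act, pMax, objetos_seleccionados):
--     pesorestante = pMax - Peso_act
--     if pesorestante > 0:
--         return True
--     else:
--         return False
--
-- def mochilabt(objetos, Mejor_peso, Peso_act, pMax, Mejor_beneficio, Beneficio_act, objetos_seleccionados, objetos_mejor_sol, i):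
--     if esSolucion(objetos, Peso_act, pMax, objetos_seleccionados):
--         if Beneficio_act > Mejor_beneficio:
--             Mejor_beneficio = Beneficio_act
--             Mejor_peso = Peso_act
--             objetos_mejor_sol = objetos_seleccionados.copy()
--     else:
--         for k in range(i, len(objetos)):
--             objeto_act = objetos[k]
--             if esFactible(objeto_act, Peso_act, pMax, objetos_seleccionados):
--                 Beneficio_act += objeto_act[2]
--                 Peso_act += objeto_act[1]
--                 objetos_seleccionados.add(objeto_act[0])
--                 Mejor_beneficio, Mejor_peso, objetos_mejor_sol = mochilabt(objetos, Mejor_peso, Peso_act, pMax, Mejor_beneficio, Beneficio_act, objetos_seleccionados, objetos_mejor_sol, k + 1)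
--                 Beneficio_act -= objeto_act[2]
--                 Peso_act -= objeto_act[1]
--                 objetos_seleccionados.remove(objeto_act[0])
--     return Mejor_beneficio, Mejor_peso, objetos_mejor_sol
-- ===== SOURCE B (Python) =====
-- def mochilabt(objetos, Mejor_peso, Peso_act, pMax, Mejor_beneficio, Beneficio_act, objetos_seleccionados, objetos_mejor_sol, i):
--     # Generate-then-reduce: enumerate every solution leaf of the search tree in
--     # pre-order (pure, no mutation), then a single linear pass keeps the first
--     # strict improvement, exactly the recursion's tie-break.
--     n = len(objetos)
--
--     def soluciones(idx, peso, ben, sel):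
--         if peso >= pMax:
--             yield ben, peso, sel
--         else:
--             for k in range(idx, n):
--                 nombre, w, b = objetos[k]
--                 yield from soluciones(k + 1, peso + w, ben + b, sel | {nombre})
--
--     for ben, peso, sel in soluciones(i, Peso_act, Beneficio_act, set(objetos_seleccionados)):
--         if ben > Mejor_beneficio:
--             Mejor_beneficio, Mejor_peso, objetos_mejor_sol = ben, peso, sel
--     return Mejor_beneficio, Mejor_peso, objetos_mejor_sol
-- ===== Notes on version B (the rewrite author's own statement) =====
-- stated objective: alternative
-- what changed: A interleaves best-tracking with mutating backtracking on one shared set (add/recurse/remove); B is a pure generate-then-reduce: a generator enumerates the solution leaves in pre-order with immutable set snapshots and a single linear fold keeps the first strict improvement.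
import Mathlib
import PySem

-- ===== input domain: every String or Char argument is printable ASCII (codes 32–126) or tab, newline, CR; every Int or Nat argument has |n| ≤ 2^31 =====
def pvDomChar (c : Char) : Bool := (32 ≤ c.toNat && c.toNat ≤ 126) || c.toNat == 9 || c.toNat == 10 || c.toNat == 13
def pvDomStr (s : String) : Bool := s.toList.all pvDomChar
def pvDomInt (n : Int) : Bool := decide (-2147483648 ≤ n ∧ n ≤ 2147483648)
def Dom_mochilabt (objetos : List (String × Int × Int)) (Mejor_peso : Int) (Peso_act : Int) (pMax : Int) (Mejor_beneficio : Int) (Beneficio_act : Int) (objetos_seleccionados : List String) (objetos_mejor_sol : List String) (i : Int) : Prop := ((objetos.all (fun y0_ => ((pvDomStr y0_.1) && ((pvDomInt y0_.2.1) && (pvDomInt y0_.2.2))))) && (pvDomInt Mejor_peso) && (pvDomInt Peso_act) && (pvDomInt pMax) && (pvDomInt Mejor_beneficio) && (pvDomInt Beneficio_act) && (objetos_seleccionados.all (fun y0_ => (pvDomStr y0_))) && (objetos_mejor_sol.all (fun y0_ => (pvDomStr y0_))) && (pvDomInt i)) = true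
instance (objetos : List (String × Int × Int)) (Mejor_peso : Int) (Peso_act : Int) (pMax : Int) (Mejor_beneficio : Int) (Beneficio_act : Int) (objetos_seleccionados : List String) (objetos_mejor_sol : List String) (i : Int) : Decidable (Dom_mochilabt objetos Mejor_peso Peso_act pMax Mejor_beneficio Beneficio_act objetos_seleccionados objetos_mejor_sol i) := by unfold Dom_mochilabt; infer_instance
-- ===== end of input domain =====

-- B replaces A's mutating backtracking (add/recurse/remove on one shared set) by a pure
-- generate-then-reduce decomposition (enumerate solution leaves in pre-order, then one fold);
-- equivalence is about the RETURN value only (A also mutates its set argument in place,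
-- restoring it on every admitted input).

-- ===== PORT A =====
def esSolucion (objetos : List (String × Int × Int)) (Peso_act : Int) (pMax : Int) (objetos_seleccionados : List String) : Bool :=
  if Peso_act ≥ pMax then true else false

def esFactible (objeto_act : String × Int × Int) (Peso_act : Int) (pMax : Int) (objetos_seleccionados : List String) : Bool :=
  let pesorestante := pMax - Peso_act
  if pesorestante > 0 then true else false

-- A's recursion, with a fuel parameter for termination (the top call passes enough fuel:
-- each recursive call increases i by at least 1, so depth ≤ len(objetos) - i).  The result
-- carries the final state of the mutated set objetos_seleccionados as a second component.
mutual
def mochAuxA (fuel : Nat) (objetos : List (String × Int × Int)) (Mejor_peso Peso_act pMax Mejor_beneficio Beneficio_act : Int) (objetos_seleccionados objetos_mejor_sol : List String) (i : Int) : (Int × Int × List String) × List String :=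
  match fuel with
  | 0 => ((Mejor_beneficio, Mejor_peso, objetos_mejor_sol), objetos_seleccionados)  -- unreachable with the fuel the top call passes
  | fuel + 1 =>
    if esSolucion objetos Peso_act pMax objetos_seleccionados then
      if Beneficio_act > Mejor_beneficio then
        ((Beneficio_act, Peso_act, objetos_seleccionados), objetos_seleccionados)
      else
        ((Mejor_beneficio, Mejor_peso, objetos_mejor_sol), objetos_seleccionados)
    else
      loopA fuel objetos (PySem.List.pyRange i (objetos.length : Int) 1) Mejor_peso Peso_act pMax Mejor_beneficio Beneficio_act objetos_seleccionados objetos_mejor_sol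
  termination_by (fuel, 0)

def loopA (fuel : Nat) (objetos : List (String × Int × Int)) (ks : List Int) (Mejor_peso Peso_act pMax Mejor_beneficio Beneficio_act : Int) (objetos_seleccionados objetos_mejor_sol : List String) : (Int × Int × List String) × List String :=
  match ks with
  | [] => ((Mejor_beneficio, Mejor_peso, objetos_mejor_sol), objetos_seleccionados)
  | k :: rest =>
    match PySem.List.pyGet? objetos k with
    | none => ((Mejor_beneficio, Mejor_peso, objetos_mejor_sol), objetos_seleccionados)  -- objetos[k] raises IndexError in Python; outside Pre_
    | some objeto_act =>
      if esFactible objeto_act Peso_act pMax objetos_seleccionados then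
        let Beneficio_act' := Beneficio_act + objeto_act.2.2
        let Peso_act' := Peso_act + objeto_act.2.1
        let sel' := PySem.Set.add objetos_seleccionados objeto_act.1
        let r := mochAuxA fuel objetos Mejor_peso Peso_act' pMax Mejor_beneficio Beneficio_act' sel' objetos_mejor_sol (k + 1)
        match PySem.Set.remove? r.2 objeto_act.1 with
        | none => r  -- set.remove raises KeyError in Python; outside Pre_
        | some sel'' =>
          loopA fuel objetos rest r.1.2.1 (Peso_act' - objeto_act.2.1) pMax r.1.1 (Beneficio_act' - objeto_act.2.2) sel'' r.1.2.2
      else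
        loopA fuel objetos rest Mejor_peso Peso_act pMax Mejor_beneficio Beneficio_act objetos_seleccionados objetos_mejor_sol
  termination_by (fuel, ks.length + 1)
end

def mochilabt (objetos : List (String × Int × Int)) (Mejor_peso : Int) (Peso_act : Int) (pMax : Int) (Mejor_beneficio : Int) (Beneficio_act : Int) (objetos_seleccionados : List String) (objetos_mejor_sol : List String) (i : Int) : Int × Int × List String :=
  (mochAuxA (((objetos.length : Int) - i).toNat + 1) objetos Mejor_peso Peso_act pMax Mejor_beneficio Beneficio_act objetos_seleccionados objetos_mejor_sol i).1

-- ===== PORT B =====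
-- B's generator: the list of solution leaves (ben, peso, sel) in pre-order.
def solsB (objetos : List (String × Int × Int)) (pMax : Int) (fuel : Nat) (idx peso ben : Int) (sel : List String) : List (Int × Int × List String) :=
  match fuel with
  | 0 => []  -- unreachable with the fuel the top call passes
  | fuel + 1 =>
    if peso ≥ pMax then
      [(ben, peso, sel)]
    else
      (PySem.List.pyRange idx (objetos.length : Int) 1).flatMap (fun k =>
        match PySem.List.pyGet? objetos k with
        | none => []  -- objetos[k] raises IndexError in Python; outside Pre_
        | some obj => solsB objetos pMax fuel (k + 1) (peso + obj.2.1) (ben + obj.2.2) (PySem.Set.union sel [obj.1]))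

-- B's reduction step: keep the first strict improvement.
def updB (acc : Int × Int × List String) (s : Int × Int × List String) : Int × Int × List String :=
  if s.1 > acc.1 then (s.1, s.2.1, s.2.2) else acc

def mochilabt_alt (objetos : List (String × Int × Int)) (Mejor_peso : Int) (Peso_act : Int) (pMax : Int) (Mejor_beneficio : Int) (Beneficio_act : Int) (objetos_seleccionados : List String) (objetos_mejor_sol : List String) (i : Int) : Int × Int × List String :=
  (solsB objetos pMax (((objetos.length : Int) - i).toNat + 1) i Peso_act Beneficio_act (PySem.Set.ofList objetos_seleccionados)).foldl updB (Mejor_beneficio, Mejor_peso, objetos_mejor_sol)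

-- ===== PRECONDITION & SPEC =====
-- Pre_ excludes inputs where Python's negative-index wraparound (i < 0 with the loop still
-- reachable) or a repeated name among the objects from position i on (or one already present
-- in objetos_seleccionados) makes A's single mutated set collide on add/remove, so A's
-- returned set is an accidental leak of that mutation (or A raises KeyError) — a
-- defensible-corner artefact; when Peso_act >= pMax the loop is never entered and nothing is
-- excluded.  It also requires objetos_seleccionados to be duplicate free, which is the set
-- type convention, not a narrowing.
def Pre_mochilabt (objetos : List (String × Int × Int)) (Mejor_peso : Int) (Peso_act : Int) (pMax : Int) (Mejor_beneficio : Int) (Beneficio_act : Int) (objetos_seleccionados : List String) (objetos_mejor_sol : List String) (i : Int) : Prop :=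
  objetos_seleccionados.Nodup ∧
  (pMax ≤ Peso_act ∨
    (0 ≤ i ∧ ((objetos.drop i.toNat).map Prod.fst).Nodup ∧
      ∀ o ∈ objetos.drop i.toNat, o.1 ∉ objetos_seleccionados))
instance (objetos : List (String × Int × Int)) (Mejor_peso : Int) (Peso_act : Int) (pMax : Int) (Mejor_beneficio : Int) (Beneficio_act : Int) (objetos_seleccionados : List String) (objetos_mejor_sol : List String) (i : Int) : Decidable (Pre_mochilabt objetos Mejor_peso Peso_act pMax Mejor_beneficio Beneficio_act objetos_seleccionados objetos_mejor_sol i) := by unfold Pre_mochilabt; infer_instance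

def pvWitness_mochilabt : (List (String × Int × Int)) × Int × Int × Int × Int × Int × List String × List String × Int :=
  ([("a", 2, 3), ("b", 1, 1)], 0, 0, 2, 0, 0, [], [], 0)

def Spec_mochilabt (objetos : List (String × Int × Int)) (Mejor_peso : Int) (Peso_act : Int) (pMax : Int) (Mejor_beneficio : Int) (Beneficio_act : Int) (objetos_seleccionados : List String) (objetos_mejor_sol : List String) (i : Int) (out : Int × Int × List String) : Prop := out = mochilabt_alt objetos Mejor_peso Peso_act pMax Mejor_beneficio Beneficio_act objetos_seleccionados objetos_mejor_sol i
instance (objetos : List (String × Int × Int)) (Mejor_peso : Int) (Peso_act : Int) (pMax : Int) (Mejor_beneficio : Int) (Beneficio_act : Int) (objetos_seleccionados : List String) (objetos_mejor_sol : List String) (i : Int) (out : Int × Int × List String) : Decidable (Spec_mochilabt objetos Mejor_peso Peso_act pMax Mejor_beneficio Beneficio_act objetos_seleccionados objetos_mejor_sol i out) := by unfold Spec_mochilabt; infer_instance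

-- ===== CLAIM (what is proved, stated in full; the proofs are below) =====
def Claim_equal_mochilabt : Prop := ∀ (objetos : List (String × Int × Int)) (Mejor_peso : Int) (Peso_act : Int) (pMax : Int) (Mejor_beneficio : Int) (Beneficio_act : Int) (objetos_seleccionados : List String) (objetos_mejor_sol : List String) (i : Int), Dom_mochilabt objetos Mejor_peso Peso_act pMax Mejor_beneficio Beneficio_act objetos_seleccionados objetos_mejor_sol i → Pre_mochilabt objetos Mejor_peso Peso_act pMax Mejor_beneficio Beneficio_act objetos_seleccionados objetos_mejor_sol i → Spec_mochilabt objetos Mejor_peso Peso_act pMax Mejor_beneficio Beneficio_act objetos_seleccionados objetos_mejor_sol i (mochilabt objetos Mejor_peso Peso_act pMax Mejor_beneficio Beneficio_act objetos_seleccionados objetos_mejor_sol i)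

-- ===== LEMMAS AND PROOFS =====

-- add appends when absent, and remove? of the freshly added element restores the set
lemma add_of_not_mem (s : List String) (x : String) (h : x ∉ s) : PySem.Set.add s x = s ++ [x] := by
  simp only [PySem.Set.add, PySem.Set.contains]
  rw [if_neg (by simpa using h)]

lemma remove?_add (s : List String) (x : String) (h : x ∉ s) :
    PySem.Set.remove? (PySem.Set.add s x) x = some s := by
  rw [add_of_not_mem s x h]
  simp [PySem.Set.remove?, PySem.Set.contains, PySem.Set.discard]
  exact fun a ha hax => h (hax ▸ ha)

-- names at distinct indices ≥ m differ when the names of objetos.drop m are duplicate free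
lemma names_ne_drop (objetos : List (String × Int × Int)) (m : Nat)
    (hnd : ((objetos.drop m).map Prod.fst).Nodup)
    (k k' : Int) (hk : (m : Int) ≤ k) (hk' : (m : Int) ≤ k') (hne : k ≠ k')
    (o o' : String × Int × Int)
    (ho : PySem.List.pyGet? objetos k = some o) (ho' : PySem.List.pyGet? objetos k' = some o') :
    o.1 ≠ o'.1 := by
  rw [PySem.List.pyGet?_of_nonneg _ (le_trans (Int.natCast_nonneg m) hk)] at ho
  rw [PySem.List.pyGet?_of_nonneg _ (le_trans (Int.natCast_nonneg m) hk')] at ho'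
  obtain ⟨h1, rfl⟩ := List.getElem?_eq_some_iff.mp ho
  obtain ⟨h2, rfl⟩ := List.getElem?_eq_some_iff.mp ho'
  intro h
  have hb1 : k.toNat - m < (objetos.drop m).length := by simp; omega
  have hb2 : k'.toNat - m < (objetos.drop m).length := by simp; omega
  have e1 : (objetos.drop m)[k.toNat - m]'hb1 = objetos[k.toNat] := by
    rw [List.getElem_drop]; congr 1; omega
  have e2 : (objetos.drop m)[k'.toNat - m]'hb2 = objetos[k'.toNat] := by
    rw [List.getElem_drop]; congr 1; omega
  have hmap : ((objetos.drop m).map Prod.fst)[k.toNat - m]'(by simpa using hb1)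
      = ((objetos.drop m).map Prod.fst)[k'.toNat - m]'(by simpa using hb2) := by
    simp only [List.getElem_map, e1, e2]; exact h
  have := (hnd.getElem_inj_iff (hi := by simpa using hb1) (hj := by simpa using hb2)).mp hmap
  omega

-- an element at index k ≥ m is a member of objetos.drop m
lemma mem_drop_of_pyGet? (objetos : List (String × Int × Int)) (m : Nat) (k : Int)
    (hk : (m : Int) ≤ k) (o : String × Int × Int)
    (ho : PySem.List.pyGet? objetos k = some o) : o ∈ objetos.drop m := by
  rw [PySem.List.pyGet?_of_nonneg _ (le_trans (Int.natCast_nonneg m) hk)] at ho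
  obtain ⟨h1, rfl⟩ := List.getElem?_eq_some_iff.mp ho
  have hb : k.toNat - m < (objetos.drop m).length := by simp; omega
  have e : (objetos.drop m)[k.toNat - m]'hb = objetos[k.toNat] := by
    rw [List.getElem_drop]; congr 1; omega
  exact e ▸ List.getElem_mem hb

-- the loop of A computes the fold of updB over the flatMap of B's child solution lists
lemma loopA_eq (fuel : Nat)
    (IH : ∀ (objetos : List (String × Int × Int)) (pMax lo idx peso ben Mb Mp : Int) (sel mejor : List String),
      0 ≤ lo → lo ≤ idx →
      (∀ (k k' : Int), lo ≤ k → lo ≤ k' → k ≠ k' → ∀ o o' : String × Int × Int,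
        PySem.List.pyGet? objetos k = some o → PySem.List.pyGet? objetos k' = some o' → o.1 ≠ o'.1) →
      (∀ k : Int, idx ≤ k → ∀ o, PySem.List.pyGet? objetos k = some o → o.1 ∉ sel) →
      mochAuxA fuel objetos Mp peso pMax Mb ben sel mejor idx
        = ((solsB objetos pMax fuel idx peso ben sel).foldl updB (Mb, Mp, mejor), sel))
    (objetos : List (String × Int × Int)) (pMax lo d : Int) (ks : List Int)
    (peso ben : Int) (sel : List String)
    (hlo : 0 ≤ lo) (hd : lo ≤ d)
    (hnames : ∀ (k k' : Int), lo ≤ k → lo ≤ k' → k ≠ k' → ∀ o o' : String × Int × Int,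
        PySem.List.pyGet? objetos k = some o → PySem.List.pyGet? objetos k' = some o' → o.1 ≠ o'.1)
    (hsel : ∀ k : Int, d ≤ k → ∀ o, PySem.List.pyGet? objetos k = some o → o.1 ∉ sel)
    (hpm : peso < pMax) :
    ∀ (Mb Mp : Int) (mejor : List String),
    (∀ k ∈ ks, d ≤ k ∧ ∃ o, PySem.List.pyGet? objetos k = some o) →
    loopA fuel objetos ks Mp peso pMax Mb ben sel mejor
      = ((ks.flatMap (fun k =>
            match PySem.List.pyGet? objetos k with
            | none => []
            | some obj => solsB objetos pMax fuel (k + 1) (peso + obj.2.1) (ben + obj.2.2) (PySem.Set.union sel [obj.1]))).foldl updB (Mb, Mp, mejor), sel) := by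
  induction ks with
  | nil => intro Mb Mp mejor _; simp [loopA]
  | cons k rest ihrest =>
    intro Mb Mp mejor hks
    obtain ⟨hdk, o, ho⟩ := hks k (List.mem_cons_self)
    have ho1 : o.1 ∉ sel := hsel k hdk o ho
    unfold loopA
    rw [ho]
    simp only []
    rw [if_pos (by simp [esFactible]; omega)]
    have hsel' : ∀ k' : Int, k + 1 ≤ k' → ∀ o', PySem.List.pyGet? objetos k' = some o' → o'.1 ∉ (PySem.Set.add sel o.1) := by
      intro k' hk' o' ho'
      rw [add_of_not_mem sel o.1 ho1]
      simp only [List.mem_append, List.mem_singleton]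
      rintro (h | h)
      · exact hsel k' (by omega) o' ho' h
      · exact hnames k' k (by omega) (by omega) (by omega) o' o ho' ho h
    rw [IH objetos pMax lo (k+1) (peso + o.2.1) (ben + o.2.2) Mb Mp (PySem.Set.add sel o.1) mejor hlo (by omega) hnames hsel']
    simp only
    rw [remove?_add sel o.1 ho1]
    simp only
    have hps : peso + o.2.1 - o.2.1 = peso := by ring
    have hbs : ben + o.2.2 - o.2.2 = ben := by ring
    rw [hps, hbs]
    set init := (solsB objetos pMax fuel (k + 1) (peso + o.2.1) (ben + o.2.2) (PySem.Set.add sel o.1)).foldl updB (Mb, Mp, mejor) with hinit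
    obtain ⟨Mb', Mp', mejor'⟩ := init
    rw [ihrest Mb' Mp' mejor' (fun k' hk' => hks k' (List.mem_cons_of_mem _ hk'))]
    simp only [List.flatMap_cons, List.foldl_append]
    rw [ho]
    simp only []
    have hadd : PySem.Set.union sel [o.1] = PySem.Set.add sel o.1 := rfl
    rw [hadd, ← hinit]

lemma mochAuxA_eq (fuel : Nat) :
    ∀ (objetos : List (String × Int × Int)) (pMax lo idx peso ben Mb Mp : Int) (sel mejor : List String),
      0 ≤ lo → lo ≤ idx →
      (∀ (k k' : Int), lo ≤ k → lo ≤ k' → k ≠ k' → ∀ o o' : String × Int × Int,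
        PySem.List.pyGet? objetos k = some o → PySem.List.pyGet? objetos k' = some o' → o.1 ≠ o'.1) →
      (∀ k : Int, idx ≤ k → ∀ o, PySem.List.pyGet? objetos k = some o → o.1 ∉ sel) →
      mochAuxA fuel objetos Mp peso pMax Mb ben sel mejor idx
        = ((solsB objetos pMax fuel idx peso ben sel).foldl updB (Mb, Mp, mejor), sel) := by
  induction fuel with
  | zero => intro objetos pMax lo idx peso ben Mb Mp sel mejor _ _ _ _; simp [mochAuxA, solsB]
  | succ fuel IH =>
    intro objetos pMax lo idx peso ben Mb Mp sel mejor hlo hidx hnames hsel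
    unfold mochAuxA solsB
    by_cases hpm : peso ≥ pMax
    · rw [if_pos (by simp [esSolucion]; omega), if_pos hpm]
      simp only [List.foldl_cons, List.foldl_nil, updB]
      split_ifs with h
      · rfl
      · rfl
    · rw [if_neg (by simp [esSolucion]; omega), if_neg hpm]
      exact loopA_eq fuel IH objetos pMax lo idx
        (PySem.List.pyRange idx (objetos.length : Int) 1) peso ben sel hlo hidx hnames hsel
        (by omega) Mb Mp mejor
        (fun k hk => by
          have hmem := (PySem.List.mem_pyRange_one).mp hk
          refine ⟨hmem.1, ?_⟩
          have hk0 : 0 ≤ k := by omega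
          have hlt : k.toNat < objetos.length := by omega
          rw [PySem.List.pyGet?_of_nonneg _ hk0]
          exact ⟨objetos[k.toNat], List.getElem?_eq_getElem hlt⟩)

-- ===== VERDICT (by name: the statement is the Claim_ definition above) =====
theorem mochilabt_spec : Claim_equal_mochilabt := by
  intro objetos Mp Pa pM Mb Ba sel mejor i _hdom hpre
  obtain ⟨hselnd, hrest⟩ := hpre
  unfold Spec_mochilabt mochilabt mochilabt_alt
  rw [PySem.Set.ofList_eq_self_of_nodup sel hselnd]
  rcases hrest with hge | ⟨hi, hnd, hdisj⟩
  · -- Peso_act ≥ pMax: both sides decide on the initial state alone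
    have hB : solsB objetos pM (((objetos.length : Int) - i).toNat + 1) i Pa Ba sel
        = [(Ba, Pa, sel)] := by
      unfold solsB; rw [if_pos (by omega)]
    rw [hB]
    unfold mochAuxA
    rw [if_pos (by simp [esSolucion]; omega)]
    simp only [List.foldl_cons, List.foldl_nil, updB]
    split_ifs with h
    · rfl
    · rfl
  · have hnames : ∀ (k k' : Int), i ≤ k → i ≤ k' → k ≠ k' → ∀ o o' : String × Int × Int,
        PySem.List.pyGet? objetos k = some o → PySem.List.pyGet? objetos k' = some o' → o.1 ≠ o'.1 := by
      intro k k' hk hk' hne o o' ho ho'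
      exact names_ne_drop objetos i.toNat hnd k k' (by omega) (by omega) hne o o' ho ho'
    have hsel : ∀ k : Int, i ≤ k → ∀ o, PySem.List.pyGet? objetos k = some o → o.1 ∉ sel := by
      intro k hk o ho
      exact hdisj o (mem_drop_of_pyGet? objetos i.toNat k (by omega) o ho)
    rw [mochAuxA_eq _ objetos pM i i Pa Ba Mb Mp sel mejor hi le_rfl hnames hsel]
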